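-- pv_equiv track=rewrite | github.com/dmehrotra/uber-ocr | ocr/parse_lyft.py | ltry_order_u
-- ===== SOURCE A (Python) =====
-- def ltry_order_u(content):
-- 	line_index = None
-- 	for l in content:
-- 		if line_index == None:
-- 			if "lyft receive" in l:
-- 				line_index = content.index(l)
-- 		else:
-- 			if "total" in l:
-- 				return l.split("total")[1].strip()
-- ===== SOURCE B (Python) =====
-- def ltry_order_u(content):
--     lyft = [i for i, l in enumerate(content) if "lyft receive" in l]
--     totals = [i for i, l in enumerate(content) if "total" in l]
--     if not lyft:
--         return None
--     j = min((t for t in totals if t > lyft[0]), default=None)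
--     if j is None:
--         return None
--     return content[j].split("total")[1].strip()
-- ===== Notes on version B (the rewrite author's own statement) =====
-- stated objective: alternative
-- what changed: Replaced A's flag-driven state machine (carrying line_index through one loop and calling content.index) with index arithmetic: two enumerate-comprehensions precompute the index lists of both markers over the whole input, then the answer line is selected as min of the total-indices strictly past the first lyft-index.
import Mathlib
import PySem

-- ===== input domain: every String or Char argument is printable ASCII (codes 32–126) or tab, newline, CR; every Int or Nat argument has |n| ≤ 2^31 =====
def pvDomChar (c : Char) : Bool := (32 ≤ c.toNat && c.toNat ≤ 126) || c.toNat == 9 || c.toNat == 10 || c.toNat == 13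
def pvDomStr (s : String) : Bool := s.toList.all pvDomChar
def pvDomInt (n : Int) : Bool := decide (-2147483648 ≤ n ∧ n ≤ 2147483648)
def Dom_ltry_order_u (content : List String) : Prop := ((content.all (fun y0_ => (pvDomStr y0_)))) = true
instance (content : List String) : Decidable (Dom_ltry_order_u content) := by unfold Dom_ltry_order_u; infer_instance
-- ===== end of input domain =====

-- B replaces A's flag-driven state machine by index arithmetic: it precomputes the index
-- lists of both markers via enumerate-comprehensions and selects min of the total-indices
-- past the first lyft-index (objective: alternative).

-- ===== PORT A =====
-- A's loop over content carrying the `line_index` state (Option Int, only ever tested against None).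
-- `l.split("total")[1]` is in range because "total" ∈ l in that branch, so `.getD 1 ""` is exact there.
def ltry_order_u_go (content : List String) : List String → Option Int → Option String
  | [], _ => none
  | l :: ls, li =>
    match li with
    | none =>
      if PySem.Str.isIn "lyft receive" l then
        ltry_order_u_go content ls ((PySem.List.index? content l).map (fun k => (k : Int)))
      else
        ltry_order_u_go content ls none
    | some i =>
      if PySem.Str.isIn "total" l then
        some (PySem.Str.strip (((PySem.Str.split? l "total").getD []).getD 1 ""))
      else
        ltry_order_u_go content ls (some i)

def ltry_order_u (content : List String) : Option String :=
  ltry_order_u_go content content none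

-- ===== PORT B =====
-- lyft = [i for i, l in enumerate(content) if "lyft receive" in l]  (and likewise totals);
-- then j = min((t for t in totals if t > lyft[0]), default=None) and content[j] is split.
-- `content[j]` is in range because j comes from enumerate(content), so `.getD ""` is exact there.
def ltry_order_u_alt (content : List String) : Option String :=
  match ((PySem.List.enumerate content).filter (fun p => PySem.Str.isIn "lyft receive" p.2)).map (fun p => p.1) with
  | [] => none
  | i :: _ =>
    match PySem.List.min? (((((PySem.List.enumerate content).filter (fun p => PySem.Str.isIn "total" p.2)).map (fun p => p.1))).filter (fun t => i < t)) (fun t => t) with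
    | none => none
    | some j =>
      some (PySem.Str.strip (((PySem.Str.split? ((PySem.List.pyGet? content j).getD "") "total").getD []).getD 1 ""))

-- ===== PRECONDITION & SPEC =====
def Spec_ltry_order_u (content : List String) (out : Option String) : Prop := out = ltry_order_u_alt content
instance (content : List String) (out : Option String) : Decidable (Spec_ltry_order_u content out) := by unfold Spec_ltry_order_u; infer_instance

-- ===== CLAIM (what is proved, stated in full; the proofs are below) =====
def Claim_equal_ltry_order_u : Prop := ∀ (content : List String), Dom_ltry_order_u content → Spec_ltry_order_u content (ltry_order_u content)

-- ===== LEMMAS AND PROOFS =====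

def pvExtract (l : String) : String :=
  PySem.Str.strip (((PySem.Str.split? l "total").getD []).getD 1 "")

def pvScan : List String → Option String
  | [] => none
  | l :: ls => if PySem.Str.isIn "total" l then some (pvExtract l) else pvScan ls

def pvIdxs (p : String → Bool) (s : Int) (xs : List String) : List Int :=
  ((PySem.List.enumerate xs s).filter (fun q => p q.2)).map (fun q => q.1)

theorem pvIdxs_nil (p : String → Bool) (s : Int) : pvIdxs p s [] = [] := rfl

theorem pvIdxs_cons (p : String → Bool) (s : Int) (x : String) (xs : List String) :
    pvIdxs p s (x :: xs) = if p x then s :: pvIdxs p (s+1) xs else pvIdxs p (s+1) xs := by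
  simp only [pvIdxs, PySem.List.enumerate_cons, List.filter_cons]
  split_ifs with h <;> simp

theorem pvIdxs_bound (p : String → Bool) :
    ∀ (xs : List String) (s t : Int), t ∈ pvIdxs p s xs → s ≤ t ∧ t < s + xs.length := by
  intro xs
  induction xs with
  | nil => intro s t h; simp [pvIdxs_nil] at h
  | cons x xs ih =>
    intro s t h
    rw [pvIdxs_cons] at h
    split_ifs at h with hp
    · rcases List.mem_cons.mp h with h | h
      · subst h; constructor <;> simp
      · have := ih (s+1) t h; simp at *; omega
    · have := ih (s+1) t h; simp at *; omega

theorem pvIdxs_append (p : String → Bool) (xs ys : List String) (s : Int) :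
    pvIdxs p s (xs ++ ys) = pvIdxs p s xs ++ pvIdxs p (s + xs.length) ys := by
  simp [pvIdxs, PySem.List.enumerate_append]

theorem pvIdxs_head? (p : String → Bool) :
    ∀ (xs : List String) (s : Int),
      (pvIdxs p s xs).head? = (xs.findIdx? p).map (fun n => s + (n : Int)) := by
  intro xs
  induction xs with
  | nil => intro s; simp [pvIdxs_nil]
  | cons x xs ih =>
    intro s
    rw [pvIdxs_cons, List.findIdx?_cons]
    split_ifs with h
    · simp
    · rw [ih (s+1)]
      cases xs.findIdx? p with
      | none => simp
      | some n => simp; ring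

-- foldl min over a list bounded below by a returns a
theorem pvFoldlMin (a : Int) : ∀ (l : List Int), (∀ x ∈ l, a ≤ x) → l.foldl min a = a := by
  intro l
  induction l generalizing a with
  | nil => intro _; rfl
  | cons x xs ih =>
    intro h
    have hx : a ≤ x := h x (List.mem_cons_self ..)
    simp only [List.foldl_cons, min_eq_left hx]
    exact ih a (fun y hy => h y (List.mem_cons_of_mem _ hy))

-- the min-and-index phase of B over the tail indices equals the direct scan of the tail
theorem pvMainLemma :
    ∀ (xs : List String) (n : Nat) (content : List String), content.drop n = xs →
      (match PySem.List.min? (pvIdxs (fun l => PySem.Str.isIn "total" l) (n : Int) xs) (fun t => t) with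
       | none => none
       | some j => some (pvExtract ((PySem.List.pyGet? content j).getD ""))) = pvScan xs := by
  intro xs
  induction xs with
  | nil => intro n content _; simp [pvIdxs_nil, PySem.List.min?, pvScan]
  | cons l ls ih =>
    intro n content hdrop
    rw [pvIdxs_cons]
    by_cases h : PySem.Str.isIn "total" l
    · have hbound : ∀ x ∈ pvIdxs (fun l => PySem.Str.isIn "total" l) ((n : Int)+1) ls, (n : Int) ≤ x := by
        intro x hx
        have := pvIdxs_bound _ ls ((n : Int)+1) x hx
        omega
      rw [if_pos h, PySem.List.min?_id_cons, pvFoldlMin _ _ hbound]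
      have hget : content[n]? = some l := by
        have : (content.drop n)[0]? = some l := by rw [hdrop]; rfl
        simpa using this
      simp only [pvScan]
      rw [if_pos h]
      simp [PySem.List.pyGet?_natCast, hget]
    · rw [if_neg h]
      have hdrop' : content.drop (n+1) = ls := by
        have : content.drop (n+1) = (content.drop n).drop 1 := by
          rw [List.drop_drop]
        rw [this, hdrop]
        simp
      have := ih (n+1) content hdrop'
      push_cast at this
      rw [this]
      simp only [pvScan]
      rw [if_neg h]

-- filtering the full total-index list past index m keeps exactly the tail indices
theorem pvFilterLemma (content : List String) (m : Nat) (hm : m < content.length) :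
    (pvIdxs (fun l => PySem.Str.isIn "total" l) 0 content).filter (fun t => (m : Int) < t)
      = pvIdxs (fun l => PySem.Str.isIn "total" l) ((m : Int) + 1) (content.drop (m+1)) := by
  have hsplit : content = content.take (m+1) ++ content.drop (m+1) := (List.take_append_drop _ _).symm
  have hlen : (content.take (m+1)).length = m + 1 := by simp; omega
  conv_lhs => rw [hsplit]
  rw [pvIdxs_append, List.filter_append, hlen]
  have h1 : (pvIdxs (fun l => PySem.Str.isIn "total" l) 0 (content.take (m+1))).filter (fun t => (m : Int) < t) = [] := by
    apply List.filter_eq_nil_iff.mpr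
    intro t ht
    have := pvIdxs_bound _ (content.take (m+1)) 0 t ht
    rw [hlen] at this
    simp only [decide_eq_true_eq]
    omega
  have h2 : (pvIdxs (fun l => PySem.Str.isIn "total" l) ((0 : Int) + ((m+1 : Nat) : Int)) (content.drop (m+1))).filter (fun t => (m : Int) < t)
      = pvIdxs (fun l => PySem.Str.isIn "total" l) ((m : Int) + 1) (content.drop (m+1)) := by
    have he : (0 : Int) + ((m+1 : Nat) : Int) = (m : Int) + 1 := by push_cast; ring
    rw [he]
    apply List.filter_eq_self.mpr
    intro t ht
    have := pvIdxs_bound _ (content.drop (m+1)) ((m : Int)+1) t ht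
    simp only [decide_eq_true_eq]
    omega
  rw [h1, h2, List.nil_append]

-- once the flag is set, A's loop ignores `content` and the flag value: it is exactly pvScan
theorem ltry_order_u_go_some (content : List String) :
    ∀ (ls : List String) (i : Int), ltry_order_u_go content ls (some i) = pvScan ls := by
  intro ls
  induction ls with
  | nil => intro i; rfl
  | cons l ls ih =>
    intro i
    simp only [ltry_order_u_go, pvScan, pvExtract]
    split_ifs with h
    · rfl
    · exact ih i

-- the flag-less phase of A: locate then scan the strict suffix
theorem ltry_order_u_go_none (content : List String) :
    ∀ (ls : List String), (∀ x ∈ ls, x ∈ content) → ltry_order_u_go content ls none =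
      (match ls.findIdx? (fun l => PySem.Str.isIn "lyft receive" l) with
       | none => none
       | some idx => pvScan (ls.drop (idx + 1))) := by
  intro ls
  induction ls with
  | nil => intro _; rfl
  | cons l ls ih =>
    intro hsub
    have hl : l ∈ content := hsub l (List.mem_cons_self ..)
    simp only [ltry_order_u_go]
    rw [List.findIdx?_cons]
    by_cases h : PySem.Str.isIn "lyft receive" l
    · obtain ⟨k, hk⟩ := Option.isSome_iff_exists.mp ((PySem.List.index?_isSome_iff content l).mpr hl)
      simp only [h, if_pos, hk, List.drop_succ_cons, List.drop_zero]
      simpa using ltry_order_u_go_some content ls (k : Int)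
    · simp only [h, if_neg, Bool.false_eq_true, not_false_iff]
      rw [ih (fun x hx => hsub x (List.mem_cons_of_mem _ hx))]
      cases hfi : ls.findIdx? (fun l => PySem.Str.isIn "lyft receive" l) with
      | none => simp
      | some j => simp [List.drop_succ_cons]

-- ===== VERDICT (by name: the statement is the Claim_ definition above) =====
theorem ltry_order_u_spec : Claim_equal_ltry_order_u := by
  intro content _
  show ltry_order_u content = ltry_order_u_alt content
  unfold ltry_order_u
  rw [ltry_order_u_go_none content content (fun x hx => hx)]
  have hlyft := pvIdxs_head? (fun l => PySem.Str.isIn "lyft receive" l) content 0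
  simp only [pvIdxs] at hlyft
  cases hfi : content.findIdx? (fun l => PySem.Str.isIn "lyft receive" l) with
  | none =>
    have hnil : (((PySem.List.enumerate content).filter (fun p => PySem.Str.isIn "lyft receive" p.2)).map (fun p => p.1)).head? = none :=
      hlyft.trans (by rw [hfi]; rfl)
    unfold ltry_order_u_alt
    rw [List.head?_eq_none_iff.mp hnil]
  | some m =>
    have hsome : (((PySem.List.enumerate content).filter (fun p => PySem.Str.isIn "lyft receive" p.2)).map (fun p => p.1)).head? = some ((0 : Int) + (m : Int)) :=
      hlyft.trans (by rw [hfi]; rfl)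
    simp only [zero_add] at hsome
    obtain ⟨rest, hrest⟩ : ∃ rest, ((PySem.List.enumerate content).filter (fun p => PySem.Str.isIn "lyft receive" p.2)).map (fun p => p.1) = (m : Int) :: rest := by
      cases hl : ((PySem.List.enumerate content).filter (fun p => PySem.Str.isIn "lyft receive" p.2)).map (fun p => p.1) with
      | nil => rw [hl] at hsome; simp at hsome
      | cons a t => rw [hl] at hsome; simp at hsome; exact ⟨t, by rw [hsome]⟩
    have hm : m < content.length := by
      have := List.findIdx?_eq_some_iff_findIdx_eq.mp hfi
      exact this.1
    have hfilt := pvFilterLemma content m hm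
    have hmain := pvMainLemma (content.drop (m+1)) (m+1) content rfl
    simp only [pvIdxs] at hfilt
    simp only [pvExtract] at hmain
    push_cast at hmain
    have halt : ltry_order_u_alt content =
        (match PySem.List.min? ((((PySem.List.enumerate content).filter (fun p => PySem.Str.isIn "total" p.2)).map (fun p => p.1)).filter (fun t => (m : Int) < t)) (fun t => t) with
         | none => none
         | some j => some (PySem.Str.strip (((PySem.Str.split? ((PySem.List.pyGet? content j).getD "") "total").getD []).getD 1 ""))) := by
      unfold ltry_order_u_alt
      rw [hrest]
    rw [halt]
    show pvScan (content.drop (m+1)) = _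
    rw [hfilt]
    exact hmain.symm
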